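-- pv_equiv track=rewrite | github.com/terminills/gator | src/backend/services/response_humanizer_service.py | _remove_summary_paragraph
-- ===== SOURCE A (Python) =====
-- def _remove_summary_paragraph(text: str) -> str:
--     """Remove summary/conclusion paragraphs from the end of responses."""
--     # Split into paragraphs
--     paragraphs = text.split('\n\n')
--
--     if len(paragraphs) <= 1:
--         return text
--
--     # Check if last paragraph is a summary
--     last_para = paragraphs[-1].lower().strip()
--     summary_starters = [
--         "in summary", "in conclusion", "to summarize", "overall",
--         "to conclude", "to sum up", "the key", "the main point",
--         "in short", "finally,", "lastly,", "to wrap up"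
--     ]
--
--     if any(last_para.startswith(starter) for starter in summary_starters):
--         paragraphs = paragraphs[:-1]
--
--     return '\n\n'.join(paragraphs)
-- ===== SOURCE B (Python) =====
-- def _remove_summary_paragraph(text: str) -> str:
--     """Remove summary/conclusion paragraphs from the end of responses."""
--     # Scan forward for the last paragraph boundary (same greedy cuts as
--     # str.split) without building the paragraph list.
--     cut = -1
--     start = 0
--     while True:
--         j = text.find('\n\n', start)
--         if j == -1:
--             break
--         cut = j
--         start = j + 2
--     if cut == -1:
--         return text
--
--     last_para = text[cut + 2:].lower().strip()
--     summary_starters = [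
--         "in summary", "in conclusion", "to summarize", "overall",
--         "to conclude", "to sum up", "the key", "the main point",
--         "in short", "finally,", "lastly,", "to wrap up"
--     ]
--     if any(last_para.startswith(starter) for starter in summary_starters):
--         return text[:cut]
--     return text
-- ===== Notes on version B (the rewrite author's own statement) =====
-- stated objective: alternative
-- what changed: B never builds the paragraph list: a single forward find-loop locates the last greedy paragraph boundary (blank-line separator) and the result is a direct slice of the original string, instead of split/join over all paragraphs.
import Mathlib
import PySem

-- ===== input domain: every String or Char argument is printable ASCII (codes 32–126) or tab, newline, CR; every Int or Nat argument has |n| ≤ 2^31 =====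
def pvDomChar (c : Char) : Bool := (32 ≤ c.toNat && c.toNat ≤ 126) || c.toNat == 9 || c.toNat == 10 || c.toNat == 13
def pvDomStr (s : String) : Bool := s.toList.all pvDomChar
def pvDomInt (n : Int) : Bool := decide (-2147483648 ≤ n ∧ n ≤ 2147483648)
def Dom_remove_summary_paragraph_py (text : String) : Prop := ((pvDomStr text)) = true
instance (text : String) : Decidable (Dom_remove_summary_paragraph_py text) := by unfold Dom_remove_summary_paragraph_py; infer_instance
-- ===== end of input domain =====

-- B replaces split('\n\n')/join with a single forward find-loop that locates the last
-- greedy paragraph boundary and slices the original string — no paragraph list is built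
-- (objective: alternative/idiomatic index arithmetic; same return value everywhere).

-- ===== PORT A =====
def remove_summary_paragraph_py (text : String) : String :=
  let paragraphs := (PySem.Str.split? text "\n\n").getD []  -- sep "\n\n" ≠ "": split? is always some
  if paragraphs.length ≤ 1 then text
  else
    -- paragraphs[-1]: the list has ≥ 2 elements here, so pyGet? is some
    let last_para := PySem.Str.strip (PySem.Str.lower ((PySem.List.pyGet? paragraphs (-1)).getD ""))
    let summary_starters : List String :=
      ["in summary", "in conclusion", "to summarize", "overall",
       "to conclude", "to sum up", "the key", "the main point",
       "in short", "finally,", "lastly,", "to wrap up"]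
    let paragraphs :=
      if summary_starters.any (fun starter => PySem.Str.startswith last_para starter) then
        PySem.List.slice paragraphs none (some (-1))
      else paragraphs
    PySem.Str.join "\n\n" paragraphs

-- ===== PORT B =====
-- the while-True find loop of Source B; fuel = len(text)+1 bounds the iterations
-- (each iteration moves start forward by at least 2)
def pvAltLoop (text : String) : Nat → Int → Int → Int
  | 0, _, cut => cut
  | fuel + 1, start, cut =>
    let j := PySem.Str.findFrom text "\n\n" start
    if j = -1 then cut
    else pvAltLoop text fuel (j + 2) j

def remove_summary_paragraph_py_alt (text : String) : String :=
  let cut := pvAltLoop text (text.toList.length + 1) 0 (-1)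
  if cut = -1 then text
  else
    let last_para := PySem.Str.strip (PySem.Str.lower (PySem.Str.slice text (some (cut + 2)) none))
    let summary_starters : List String :=
      ["in summary", "in conclusion", "to summarize", "overall",
       "to conclude", "to sum up", "the key", "the main point",
       "in short", "finally,", "lastly,", "to wrap up"]
    if summary_starters.any (fun starter => PySem.Str.startswith last_para starter) then
      PySem.Str.slice text none (some cut)
    else text

-- ===== PRECONDITION & SPEC =====
def Spec_remove_summary_paragraph_py (text : String) (out : String) : Prop := out = remove_summary_paragraph_py_alt text
instance (text : String) (out : String) : Decidable (Spec_remove_summary_paragraph_py text out) := by unfold Spec_remove_summary_paragraph_py; infer_instance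

-- ===== CLAIM (what is proved, stated in full; the proofs are below) =====
def Claim_equal_remove_summary_paragraph_py : Prop := ∀ (text : String), Dom_remove_summary_paragraph_py text → Spec_remove_summary_paragraph_py text (remove_summary_paragraph_py text)

-- ===== LEMMAS AND PROOFS =====

-- the separator, on the list side
def pvSep : List Char := ['\n', '\n']

-- reference (accumulator-free) form of text.split('\n\n') on List Char
def pvS : List Char → List (List Char)
  | [] => [[]]
  | c :: rest =>
    if pvSep.isPrefixOf (c :: rest) then [] :: pvS (List.drop pvSep.length (c :: rest))
    else (pvS rest).modifyHead (c :: ·)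
termination_by l => l.length
decreasing_by all_goals simp [pvSep]

-- position of the LAST greedy cut (left-to-right, skipping the separator), if any
def pvLC : List Char → Option Nat
  | [] => none
  | c :: rest =>
    if pvSep.isPrefixOf (c :: rest) then
      match pvLC (List.drop pvSep.length (c :: rest)) with
      | none => some 0
      | some k => some (k + 2)
    else (pvLC rest).map (· + 1)
termination_by l => l.length
decreasing_by all_goals simp [pvSep]

theorem pvS_ne_nil (l : List Char) : pvS l ≠ [] := by
  fun_induction pvS l with
  | case1 => simp
  | case2 c rest h ih => simp
  | case3 c rest h ih => simp; exact fun hh => ih (by simpa using hh)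

theorem pv_go_eq (fuel : Nat) : ∀ (l cur : List Char) (acc : List (List Char)), l.length < fuel →
    PySem.Chars.splitOn.go pvSep fuel l cur acc = acc.reverse ++ (pvS l).modifyHead (cur.reverse ++ ·) := by
  induction fuel with
  | zero => intro l cur acc h; omega
  | succ fuel ih =>
    intro l cur acc h
    match l with
    | [] => simp [PySem.Chars.splitOn.go, pvS]
    | c :: rest =>
      by_cases hp : pvSep.isPrefixOf (c :: rest)
      · rw [show PySem.Chars.splitOn.go pvSep (fuel+1) (c :: rest) cur acc
             = PySem.Chars.splitOn.go pvSep fuel (List.drop pvSep.length (c :: rest)) [] (cur.reverse :: acc) by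
           simp [PySem.Chars.splitOn.go, hp]]
        rw [ih _ _ _ (by simp [pvSep] at *; omega)]
        simp [pvS, hp]
        exact congrFun List.modifyHead_id _
      · rw [show PySem.Chars.splitOn.go pvSep (fuel+1) (c :: rest) cur acc
             = PySem.Chars.splitOn.go pvSep fuel rest (c :: cur) acc by
           simp [PySem.Chars.splitOn.go, hp]]
        rw [ih _ _ _ (by simp at h; omega)]
        rw [show pvS (c :: rest) = (pvS rest).modifyHead (c :: ·) by simp [pvS, hp]]
        rw [List.modifyHead_modifyHead]
        have he : ((fun x => cur.reverse ++ x) ∘ fun x => c :: x) = (fun x => (c :: cur).reverse ++ x) := by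
          funext x; simp
        rw [he]

theorem pv_splitOn_eq (cs : List Char) : PySem.Chars.splitOn cs pvSep = pvS cs := by
  rw [show PySem.Chars.splitOn cs pvSep = PySem.Chars.splitOn.go pvSep (cs.length + 1) cs [] [] from rfl]
  rw [pv_go_eq (cs.length + 1) cs [] [] (by omega)]
  simp
  exact congrFun List.modifyHead_id _

theorem pv_intercalate_cons (x : List Char) (l : List (List Char)) (h : l ≠ []) (sep : List Char) :
    sep.intercalate (x :: l) = x ++ sep ++ sep.intercalate l := by
  obtain ⟨y, l', rfl⟩ := List.exists_cons_of_ne_nil h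
  simp [List.intercalate, List.intersperse]

theorem pvLC_none_iff (cs : List Char) : pvLC cs = none ↔ ¬ pvSep <:+: cs := by
  fun_induction pvLC cs with
  | case1 => simp [pvSep]
  | case2 c rest h _ _ => simp_all [List.isPrefixOf_iff_prefix]; exact h.isInfix
  | case3 c rest h _ _ _ => simp_all [List.isPrefixOf_iff_prefix]; exact (List.IsPrefix.isInfix ‹_›)
  | case4 c rest h ih =>
    simp only [Option.map_eq_none_iff, ih, List.infix_cons_iff]
    simp [List.isPrefixOf_iff_prefix] at h
    tauto

theorem pvS_of_LC_none {cs : List Char} (h : pvLC cs = none) : pvS cs = [cs] := by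
  fun_induction pvS cs with
  | case1 => rfl
  | case2 c rest hp ih => simp [pvLC, hp] at h; split at h <;> simp_all
  | case3 c rest hp ih =>
    simp [pvLC, hp] at h
    rw [ih h]
    rfl

theorem pv_intercalate_modifyHead (c : Char) (l : List (List Char)) (h : l ≠ []) (sep : List Char) :
    sep.intercalate (l.modifyHead (c :: ·)) = c :: sep.intercalate l := by
  obtain ⟨p0, l', rfl⟩ := List.exists_cons_of_ne_nil h
  match l' with
  | [] => simp [List.intercalate]
  | q :: l'' =>
    rw [List.modifyHead_cons, pv_intercalate_cons (c :: p0) (q :: l'') (by simp) sep,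
        pv_intercalate_cons p0 (q :: l'') (by simp) sep]
    simp

theorem pvS_of_LC_some {cs : List Char} {k : Nat} (h : pvLC cs = some k) :
    k + 2 ≤ cs.length ∧
    ∃ ps, pvS cs = ps ++ [List.drop (k + 2) cs] ∧ ps ≠ [] ∧
      pvSep.intercalate ps = List.take k cs := by
  induction cs using pvLC.induct generalizing k with
  | case1 => simp [pvLC] at h
  | case2 c rest hp hnone =>
    obtain ⟨t, ht⟩ := (List.isPrefixOf_iff_prefix.mp hp)
    have hc : c :: rest = '\n' :: '\n' :: t := by rw [← ht]; rfl
    have hdrop : List.drop pvSep.length (c :: rest) = t := by rw [hc]; rfl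
    rw [hdrop] at hnone
    rw [show pvLC (c :: rest) = (match pvLC t with | none => some 0 | some k => some (k + 2)) by
          simp [pvLC, hp, hdrop], hnone] at h
    obtain rfl : (0 : Nat) = k := by simpa using h
    refine ⟨by simp [hc], [[]], ?_, by simp, by simp [List.intercalate]⟩
    rw [show pvS (c :: rest) = [] :: pvS t by simp [pvS, hp, hdrop]]
    rw [pvS_of_LC_none hnone, hc]
    simp
  | case3 c rest hp k' hsome ih =>
    obtain ⟨t, ht⟩ := (List.isPrefixOf_iff_prefix.mp hp)
    have hc : c :: rest = '\n' :: '\n' :: t := by rw [← ht]; rfl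
    have hdrop : List.drop pvSep.length (c :: rest) = t := by rw [hc]; rfl
    have hsome' : pvLC t = some k' := hdrop ▸ hsome
    rw [show pvLC (c :: rest) = (match pvLC t with | none => some 0 | some k => some (k + 2)) by
          simp [pvLC, hp, hdrop], hsome'] at h
    obtain rfl : k' + 2 = k := by simpa using h
    obtain ⟨hlen, ps', hS, hne, hint⟩ := ih hsome
    rw [hdrop] at hlen hS hint
    refine ⟨by rw [hc]; simp; omega, [] :: ps', ?_, by simp, ?_⟩
    · rw [show pvS (c :: rest) = [] :: pvS t by simp [pvS, hp, hdrop]]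
      rw [hS, hc]
      simp
    · rw [pv_intercalate_cons _ _ hne, hint, hc]
      rfl
  | case4 c rest hp ih =>
    rw [show pvLC (c :: rest) = (pvLC rest).map (· + 1) by simp [pvLC, hp]] at h
    rw [Option.map_eq_some_iff] at h
    obtain ⟨k', hk', rfl⟩ := h
    obtain ⟨hlen, ps', hS, hne, hint⟩ := ih hk'
    refine ⟨by simp; omega, ps'.modifyHead (c :: ·), ?_, by simpa using hne, ?_⟩
    · rw [show pvS (c :: rest) = (pvS rest).modifyHead (c :: ·) by simp [pvS, hp]]
      rw [hS]
      obtain ⟨p0, l', rfl⟩ := List.exists_cons_of_ne_nil hne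
      simp [show k' + 1 + 2 = k' + 2 + 1 by omega]
    · rw [pv_intercalate_modifyHead _ _ hne, hint]
      rfl

theorem pv_intercalate_pvS (cs : List Char) : pvSep.intercalate (pvS cs) = cs := by
  fun_induction pvS cs with
  | case1 => simp [List.intercalate]
  | case2 c rest hp ih =>
    obtain ⟨t, ht⟩ := (List.isPrefixOf_iff_prefix.mp hp)
    have hc : c :: rest = '\n' :: '\n' :: t := by rw [← ht]; rfl
    have hdrop : List.drop pvSep.length (c :: rest) = t := by rw [hc]; rfl
    rw [pv_intercalate_cons _ _ (pvS_ne_nil _), ih, hdrop, hc]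
    rfl
  | case3 c rest hp ih =>
    rw [pv_intercalate_modifyHead _ _ (pvS_ne_nil _), ih]

-- greedy last-cut recursion through the FIRST occurrence
theorem pvLC_through_first (f : Nat) (d : List Char)
    (hocc : pvSep <+: List.drop f d) (hmin : ∀ i < f, ¬ pvSep <+: List.drop i d) :
    pvLC d = match pvLC (List.drop (f + 2) d) with
             | none => some f
             | some k => some (f + 2 + k) := by
  induction f generalizing d with
  | zero =>
    simp only [List.drop_zero] at hocc
    have hp : pvSep.isPrefixOf d := List.isPrefixOf_iff_prefix.mpr hocc
    obtain ⟨t, rfl⟩ := hocc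
    rw [show pvLC (pvSep ++ t) = (match pvLC (List.drop pvSep.length (pvSep ++ t)) with
          | none => some 0 | some k => some (k + 2)) by
        rw [show pvSep ++ t = '\n' :: '\n' :: t from rfl] at hp ⊢
        simp [pvLC, hp]]
    have h2 : List.drop pvSep.length (pvSep ++ t) = t := by simp
    have h3 : List.drop (0 + 2) (pvSep ++ t) = t := by
      rw [show (0 : Nat) + 2 = pvSep.length from rfl]
      simp
    rw [h2, h3]
    cases pvLC t <;> simp <;> omega
  | succ f ih =>
    have h0 : ¬ pvSep <+: d := by simpa using hmin 0 (by omega)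
    have hd : d ≠ [] := by
      intro hnil
      rw [hnil] at hocc
      simp [pvSep] at hocc
    obtain ⟨c, rest, rfl⟩ := List.exists_cons_of_ne_nil hd
    have hp : pvSep.isPrefixOf (c :: rest) = false := by
      rw [Bool.eq_false_iff]
      intro hh
      exact h0 (List.isPrefixOf_iff_prefix.mp hh)
    rw [show pvLC (c :: rest) = (pvLC rest).map (· + 1) by simp [pvLC, hp]]
    rw [ih rest (by simpa using hocc) (fun i hi => by simpa using hmin (i + 1) (by omega))]
    have : List.drop (f + 2) rest = List.drop (f + 1 + 2) (c :: rest) := by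
      rw [show f + 1 + 2 = (f + 2) + 1 by omega, List.drop_succ_cons]
    rw [this]
    cases pvLC (List.drop (f + 1 + 2) (c :: rest)) <;> simp <;> omega

theorem pv_loop_eq (text : String) (fuel start : Nat) (cut : Int)
    (hs : start ≤ text.toList.length) (hf : text.toList.length - start < fuel) :
    pvAltLoop text fuel (start : Int) cut =
      match pvLC (List.drop start text.toList) with
      | none => cut
      | some k => ((start + k : Nat) : Int) := by
  induction fuel generalizing start cut with
  | zero => omega
  | succ fuel ih =>
    have hsep : ("\n\n" : String).toList = pvSep := by rfl
    rw [show pvAltLoop text (fuel + 1) (start : Int) cut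
          = (if PySem.Str.findFrom text "\n\n" (start : Int) = -1 then cut
             else pvAltLoop text fuel (PySem.Str.findFrom text "\n\n" (start : Int) + 2)
                    (PySem.Str.findFrom text "\n\n" (start : Int))) from rfl]
    rw [PySem.Str.findFrom_eq, hsep,
        PySem.Chars.findFrom_natCast text.toList pvSep start hs]
    set d := List.drop start text.toList with hd
    by_cases hfind : PySem.Chars.find d pvSep = -1
    · rw [if_pos (by simp [hfind])]
      have : pvLC d = none := (pvLC_none_iff d).mpr ((PySem.Chars.find_eq_neg_one_iff d pvSep).mp hfind)
      rw [this]
    · have hinf : pvSep <:+: d := (PySem.Chars.find_ne_neg_one_iff d pvSep).mp hfind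
      have hpos : 0 ≤ PySem.Chars.find d pvSep := (PySem.Chars.find_nonneg_iff d pvSep).mpr hinf
      obtain ⟨hpre, hmin⟩ := PySem.Chars.find_spec hpos
      set fN := (PySem.Chars.find d pvSep).toNat with hfN
      have hfcast : PySem.Chars.find d pvSep = (fN : Int) := by omega
      have hdlen : 2 ≤ d.length - fN := by
        have := hpre.length_le
        simp [pvSep] at this
        omega
      have hdl : d.length = text.toList.length - start := by rw [hd]; simp
      have hstart' : start + fN + 2 ≤ text.toList.length := by omega
      rw [if_neg (by rw [if_neg hfind, hfcast]; omega)]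
      rw [show (if PySem.Chars.find d pvSep = -1 then -1 else (start : Int) + PySem.Chars.find d pvSep)
            = ((start + fN : Nat) : Int) by rw [if_neg hfind, hfcast]; push_cast; ring]
      rw [show ((start + fN : Nat) : Int) + 2 = ((start + fN + 2 : Nat) : Int) by push_cast; ring]
      rw [ih (start + fN + 2) ((start + fN : Nat) : Int) (by omega) (by omega)]
      have hthrough := pvLC_through_first fN d hpre hmin
      have hdd : List.drop (fN + 2) d = List.drop (start + fN + 2) text.toList := by
        rw [hd, List.drop_drop]
        congr 1
      rw [hdd] at hthrough
      rw [hthrough]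
      cases pvLC (List.drop (start + fN + 2) text.toList) with
      | none => simp
      | some k => simp; ring

theorem pv_pyGet_neg_one {α : Type} (xs : List α) : PySem.List.pyGet? xs (-1) = xs.getLast? := by
  simp [PySem.List.pyGet?, PySem.List.pyIdx?]
  match xs with
  | [] => simp
  | y :: ys =>
    rw [if_pos (by simp)]
    simp [List.getLast?_eq_getElem?]

theorem pv_slice_neg_one {α : Type} (xs : List α) : PySem.List.slice xs none (some (-1)) = xs.dropLast := by
  simp [PySem.List.slice, PySem.List.clampIdx]
  match xs with
  | [] => simp
  | y :: ys =>
    rw [List.dropLast_eq_take]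
    congr 1
    simp

theorem pv_main (text : String) : remove_summary_paragraph_py text = remove_summary_paragraph_py_alt text := by
  have hsep : ("\n\n" : String).toList = pvSep := rfl
  obtain ⟨PS, hPS, hmap⟩ :
      ∃ PS : List String, PySem.Str.split? text "\n\n" = some PS ∧ PS.map String.toList = pvS text.toList := by
    have h := PySem.Str.split?_map text "\n\n"
    rw [hsep] at h
    rw [show PySem.Chars.split? text.toList pvSep = some (PySem.Chars.splitOn text.toList pvSep) by
          simp [PySem.Chars.split?, pvSep]] at h
    rw [pv_splitOn_eq] at h
    cases hx : PySem.Str.split? text "\n\n" with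
    | none => rw [hx] at h; simp at h
    | some PS => exact ⟨PS, rfl, by rw [hx] at h; simpa using h⟩
  have hloop : pvAltLoop text (text.toList.length + 1) 0 (-1) =
      (match pvLC text.toList with | none => (-1 : Int) | some k => ((k : Nat) : Int)) := by
    have h := pv_loop_eq text (text.toList.length + 1) 0 (-1) (by omega) (by omega)
    simp only [Nat.cast_zero, List.drop_zero] at h
    rw [h]
    cases pvLC text.toList <;> simp
  cases hLC : pvLC text.toList with
  | none =>
    have h1 : pvS text.toList = [text.toList] := pvS_of_LC_none hLC
    have hlen : PS.length = 1 := by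
      have := congrArg List.length hmap
      simpa [h1] using this
    rw [hLC] at hloop
    unfold remove_summary_paragraph_py remove_summary_paragraph_py_alt
    rw [hPS]
    simp only [Option.getD_some]
    rw [show pvAltLoop text (text.toList.length + 1) 0 (-1) = -1 from hloop]
    rw [if_pos (by omega : PS.length ≤ 1), if_pos rfl]
  | some k =>
    obtain ⟨hklen, ps, hS, hne, hint⟩ := pvS_of_LC_some hLC
    have hpslen : 1 ≤ ps.length := List.length_pos_iff.mpr hne
    have hlen2 : PS.length = ps.length + 1 := by
      have := congrArg List.length hmap
      simp [hS] at this
      omega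
    rw [hLC] at hloop
    -- the last paragraph, on the A side
    have h3 : (PS.map String.toList).getLast? = some (List.drop (k + 2) text.toList) := by
      rw [hmap, hS]
      simp
    rw [List.getLast?_map] at h3
    obtain ⟨sL, hsL, hsLtl⟩ : ∃ sL, PS.getLast? = some sL ∧ sL.toList = List.drop (k + 2) text.toList := by
      cases hx : PS.getLast? with
      | none => rw [hx] at h3; simp at h3
      | some sL => rw [hx] at h3; exact ⟨sL, rfl, by simpa using h3⟩
    -- it equals B's tail slice
    have hstr : sL = PySem.Str.slice text (some ((k : Int) + 2)) none := by
      apply String.ext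
      rw [PySem.Str.toList_slice, hsLtl]
      simp only [PySem.Chars.slice_eq_listSlice]
      rw [PySem.List.slice_from text.toList (by omega : (0:Int) ≤ (k : Int) + 2)]
      congr 1
    unfold remove_summary_paragraph_py remove_summary_paragraph_py_alt
    rw [hPS, hloop]
    simp only [Option.getD_some, pv_pyGet_neg_one, hsL, hstr]
    rw [if_neg (by omega : ¬ PS.length ≤ 1), if_neg (by omega : ¬ ((k : Int) = -1))]
    by_cases hcond : (["in summary", "in conclusion", "to summarize", "overall",
       "to conclude", "to sum up", "the key", "the main point",
       "in short", "finally,", "lastly,", "to wrap up"] : List String).any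
        (fun starter => PySem.Str.startswith
          (PySem.Str.strip (PySem.Str.lower (PySem.Str.slice text (some ((k : Int) + 2)) none))) starter)
    · rw [if_pos hcond, if_pos hcond]
      apply String.ext
      rw [PySem.Str.toList_join, hsep]
      rw [pv_slice_neg_one]
      rw [show PySem.Chars.join pvSep (PS.dropLast.map String.toList)
            = pvSep.intercalate ((PS.map String.toList).dropLast) by
          simp [PySem.Chars.join, List.map_dropLast]]
      rw [hmap, hS, List.dropLast_concat, hint]
      rw [PySem.Str.toList_slice]
      simp only [PySem.Chars.slice_eq_listSlice]
      rw [PySem.List.slice_to text.toList (by omega : (0:Int) ≤ (k : Int))]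
      congr 1
    · rw [if_neg hcond, if_neg hcond]
      apply String.ext
      rw [PySem.Str.toList_join, hsep]
      rw [show PySem.Chars.join pvSep (PS.map String.toList) = pvSep.intercalate (PS.map String.toList) from rfl]
      rw [hmap, pv_intercalate_pvS]

-- ===== VERDICT (by name: the statement is the Claim_ definition above) =====
theorem remove_summary_paragraph_py_spec : Claim_equal_remove_summary_paragraph_py := by
  unfold Claim_equal_remove_summary_paragraph_py
  intro text _
  unfold Spec_remove_summary_paragraph_py
  exact pv_main text
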